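-- pv_equiv track=rewrite | github.com/MrBrantCode/unitest_baseline | mut_generate/mist_train_cf/cf_51342/solution.py | fibonacci_quadruplet
-- ===== SOURCE A (Python) =====
-- def fibonacci_quadruplet(arr):
--   fib_set = set()
--   a, b = 0, 1
--   while a <= 1000:
--     fib_set.add(a)
--     a, b = b, a + b
--   seq = 0
--   for num in arr:
--     if num in fib_set:
--       seq += 1
--       if seq >= 4:
--         return True
--     else:
--       seq = 0
--   return False
-- ===== SOURCE B (Python) =====
-- def _isqrt(m):
--     r = m
--     while r * r > m:
--         r = (r + m // r) // 2
--     return r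
--
-- def _is_square(m):
--     if m < 0:
--         return False
--     r = _isqrt(m)
--     return r * r == m
--
-- def _is_fib(x):
--     # nonnegative x is a Fibonacci number iff 5*x*x+4 or 5*x*x-4 is a perfect square;
--     # the bound x <= 1000 matches A's bounded generation
--     return 0 <= x <= 1000 and (_is_square(5 * x * x + 4) or _is_square(5 * x * x - 4))
--
-- def fibonacci_quadruplet(arr):
--     for i in range(len(arr) - 3):
--         if _is_fib(arr[i]) and _is_fib(arr[i + 1]) and _is_fib(arr[i + 2]) and _is_fib(arr[i + 3]):
--             return True
--     return False
-- ===== Notes on version B (the rewrite author's own statement) =====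
-- stated objective: alternative
-- what changed: B builds no Fibonacci set at all: each element is tested with the closed-form number-theoretic criterion (x is Fibonacci iff 5x^2+4 or 5x^2-4 is a perfect square, via Newton integer sqrt), and instead of A's reset-on-miss streak counter it scans overlapping windows of four indices.
import Mathlib
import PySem

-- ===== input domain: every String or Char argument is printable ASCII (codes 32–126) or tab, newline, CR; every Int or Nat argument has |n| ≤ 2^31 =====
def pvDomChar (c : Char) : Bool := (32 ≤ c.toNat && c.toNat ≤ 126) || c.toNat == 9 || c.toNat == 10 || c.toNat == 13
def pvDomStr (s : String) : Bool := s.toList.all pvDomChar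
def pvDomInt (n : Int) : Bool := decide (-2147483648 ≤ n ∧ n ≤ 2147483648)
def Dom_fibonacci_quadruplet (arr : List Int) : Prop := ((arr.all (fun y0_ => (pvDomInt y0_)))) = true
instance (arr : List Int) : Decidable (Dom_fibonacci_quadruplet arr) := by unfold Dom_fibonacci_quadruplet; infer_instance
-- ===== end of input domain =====

-- B drops A's precomputed Fibonacci set entirely: a closed-form perfect-square test
-- (5x^2±4) decides membership per element, and overlapping 4-windows replace the
-- reset-on-miss streak counter; alternative decomposition, same asymptotic cost.

-- ===== PORT A =====
-- the 'while a <= 1000' loop; fuel 20 exceeds the 17 iterations the bound allows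
def pvFibLoopA : Nat → Int → Int → PySem.Set Int → PySem.Set Int
  | 0, _, _, s => s
  | fuel + 1, a, b, s => if a ≤ 1000 then pvFibLoopA fuel b (a + b) (PySem.Set.add s a) else s

-- the 'for num in arr' loop with the running counter seq and early return
def pvSeqLoopA (fs : PySem.Set Int) : Nat → List Int → Bool
  | _, [] => false
  | seq, num :: rest =>
    if PySem.Set.contains fs num then
      if seq + 1 ≥ 4 then true else pvSeqLoopA fs (seq + 1) rest
    else pvSeqLoopA fs 0 rest

def fibonacci_quadruplet (arr : List Int) : Bool :=
  let fib_set := pvFibLoopA 20 0 1 PySem.Set.empty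
  pvSeqLoopA fib_set 0 arr

-- ===== PORT B =====
-- Newton integer sqrt 'while r*r > m: r = (r + m//r)//2'; for m ≥ 0 it converges from
-- r = m in at most bitLength m steps, so fuel 64 covers every m that B reaches
def pvNewton : Nat → Int → Int → Int
  | 0, _, r => r
  | fuel + 1, m, r =>
    if r * r > m then pvNewton fuel m (PySem.Int.floordiv (r + PySem.Int.floordiv m r) 2) else r

def pvIsSquare (m : Int) : Bool :=
  if m < 0 then false
  else
    let r := pvNewton 64 m m
    r * r == m

def pvIsFib (x : Int) : Bool :=
  -- Python's short-circuit 'and': the square tests run only under the bound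
  if 0 ≤ x && x ≤ 1000 then pvIsSquare (5 * x * x + 4) || pvIsSquare (5 * x * x - 4)
  else false

def fibonacci_quadruplet_alt (arr : List Int) : Bool :=
  (PySem.List.pyRange 0 ((arr.length : Int) - 3) 1).any (fun i =>
    pvIsFib (PySem.List.pyGetD arr i 0) &&
    (pvIsFib (PySem.List.pyGetD arr (i + 1) 0) &&
    (pvIsFib (PySem.List.pyGetD arr (i + 2) 0) &&
     pvIsFib (PySem.List.pyGetD arr (i + 3) 0))))

-- ===== PRECONDITION & SPEC =====
def Spec_fibonacci_quadruplet (arr : List Int) (out : Bool) : Prop := out = fibonacci_quadruplet_alt arr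
instance (arr : List Int) (out : Bool) : Decidable (Spec_fibonacci_quadruplet arr out) := by unfold Spec_fibonacci_quadruplet; infer_instance

-- ===== CLAIM (what is proved, stated in full; the proofs are below) =====
def Claim_equal_fibonacci_quadruplet : Prop := ∀ (arr : List Int), Dom_fibonacci_quadruplet arr → Spec_fibonacci_quadruplet arr (fibonacci_quadruplet arr)

-- ===== LEMMAS AND PROOFS =====

-- A's set, evaluated
theorem pvFibSet_eval :
    pvFibLoopA 20 0 1 PySem.Set.empty =
      [0, 1, 2, 3, 5, 8, 13, 21, 34, 55, 89, 144, 233, 377, 610, 987] := by decide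

-- B's closed-form test agrees with membership in A's set, on all of Int
set_option maxRecDepth 100000 in
theorem pvIsFib_eq_contains (x : Int) :
    pvIsFib x = PySem.Set.contains (pvFibLoopA 20 0 1 PySem.Set.empty) x := by
  rw [pvFibSet_eval]
  by_cases h : 0 ≤ x ∧ x ≤ 1000
  · obtain ⟨h0, h1⟩ := h
    have hx : x = (x.toNat : Int) := (Int.toNat_of_nonneg h0).symm
    have hb : x.toNat < 1001 := by omega
    rw [hx]
    revert hb
    exact (by decide :
      ∀ n : Nat, n < 1001 →
        pvIsFib (n : Int) =
          PySem.Set.contains ([0, 1, 2, 3, 5, 8, 13, 21, 34, 55, 89, 144, 233, 377, 610, 987] : PySem.Set Int) (n : Int))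
      x.toNat
  · have hguard : (0 ≤ x && x ≤ 1000) = false := by
      simp only [Bool.and_eq_false_iff, decide_eq_false_iff_not, not_le]
      omega
    have hmem : x ∉ ([0, 1, 2, 3, 5, 8, 13, 21, 34, 55, 89, 144, 233, 377, 610, 987] : List Int) := by
      intro hm
      simp only [List.mem_cons, List.not_mem_nil, or_false] at hm
      omega
    rw [pvIsFib, hguard]
    simp [PySem.Set.contains, List.contains_eq_mem, hmem]

-- first n flags all true (false if fewer than n flags)
def pvAllN : Nat → List Bool → Bool
  | 0, _ => true
  | _ + 1, [] => false
  | n + 1, x :: xs => x && pvAllN n xs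

-- some window of 4 consecutive true flags
def pvRun4 : List Bool → Bool
  | [] => false
  | x :: xs => pvAllN 4 (x :: xs) || pvRun4 xs

theorem pvAllN_succ_nil (n : Nat) : pvAllN (n + 1) [] = false := rfl
theorem pvAllN_succ_cons (n : Nat) (x : Bool) (l : List Bool) :
    pvAllN (n + 1) (x :: l) = (x && pvAllN n l) := rfl
theorem pvAllN_four_cons (x : Bool) (l : List Bool) :
    pvAllN 4 (x :: l) = (x && pvAllN 3 l) := rfl
theorem pvRun4_cons (x : Bool) (l : List Bool) :
    pvRun4 (x :: l) = (pvAllN 4 (x :: l) || pvRun4 l) := rfl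

theorem pvAllN_mono : ∀ (l : List Bool) (n m : Nat), n ≤ m → pvAllN m l = true → pvAllN n l = true := by
  intro l
  induction l with
  | nil =>
    intro n m hnm hm
    cases m with
    | zero => have hn : n = 0 := by omega
              subst hn; exact hm
    | succ m => rw [pvAllN_succ_nil] at hm; exact absurd hm (by simp)
  | cons x xs ih =>
    intro n m hnm hm
    cases n with
    | zero => rfl
    | succ n =>
      cases m with
      | zero => omega
      | succ m =>
        rw [pvAllN_succ_cons] at hm ⊢
        simp only [Bool.and_eq_true] at hm ⊢
        exact ⟨hm.1, ih n m (by omega) hm.2⟩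

theorem pvAllN_short : ∀ (l : List Bool) (n : Nat), l.length < n → pvAllN n l = false := by
  intro l
  induction l with
  | nil =>
    intro n h
    cases n with
    | zero => simp at h
    | succ n => exact pvAllN_succ_nil n
  | cons x xs ih =>
    intro n h
    cases n with
    | zero => simp at h
    | succ n =>
      rw [pvAllN_succ_cons, ih n (by simpa using h)]
      simp

theorem pvRun4_absorb : ∀ (l : List Bool), (pvAllN 4 l || pvRun4 l) = pvRun4 l := by
  intro l
  cases l with
  | nil => rfl
  | cons x xs => rw [pvRun4_cons]; simp

theorem pvRun4_short : ∀ (l : List Bool), l.length < 4 → pvRun4 l = false := by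
  intro l
  induction l with
  | nil => intro _; rfl
  | cons x xs ih =>
    intro h
    rw [pvRun4_cons, pvAllN_short _ 4 (by simp at h ⊢; omega), ih (by simp at h ⊢; omega)]
    rfl

-- A's counter loop characterised: an all-true prefix completing the current run, or a window later
theorem pvSeqLoopA_eq (fs : PySem.Set Int) :
    ∀ (l : List Int) (s : Nat), s < 4 →
      pvSeqLoopA fs s l =
        (pvAllN (4 - s) (l.map (fun x => PySem.Set.contains fs x)) ||
         pvRun4 (l.map (fun x => PySem.Set.contains fs x))) := by
  intro l
  induction l with
  | nil =>
    intro s hs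
    rw [show (4 : Nat) - s = (3 - s) + 1 from by omega]
    rw [List.map_nil, pvAllN_succ_nil]
    rfl
  | cons x xs ih =>
    intro s hs
    simp only [pvSeqLoopA, List.map_cons]
    by_cases hx : PySem.Set.contains fs x = true
    · rw [if_pos hx, hx]
      by_cases hs3 : s + 1 ≥ 4
      · rw [if_pos hs3]
        have hseq : s = 3 := by omega
        subst hseq
        rw [show (4 : Nat) - 3 = 1 from rfl, pvAllN_succ_cons]
        simp [pvAllN]
      · rw [if_neg hs3, ih (s + 1) (by omega), show (4 : Nat) - (s + 1) = 3 - s from by omega,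
            show (4 : Nat) - s = (3 - s) + 1 from by omega, pvAllN_succ_cons, pvRun4_cons,
            pvAllN_four_cons]
        simp only [Bool.true_and]
        set L := xs.map (fun x => PySem.Set.contains fs x) with hL
        by_cases h3 : pvAllN 3 L = true
        · rw [h3, pvAllN_mono L (3 - s) 3 (by omega) h3]
          simp
        · rw [Bool.not_eq_true] at h3
          rw [h3]
          simp
    · rw [if_neg hx]
      rw [Bool.not_eq_true] at hx
      rw [hx, ih 0 (by omega), show (4 : Nat) - 0 = 4 from rfl,
          show (4 : Nat) - s = (3 - s) + 1 from by omega, pvAllN_succ_cons, pvRun4_cons,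
          pvAllN_four_cons, pvRun4_absorb]
      simp

-- the first-three-flags reads equal pvAllN 3 when at least 3 flags exist (any default)
theorem pvFront3 : ∀ (l : List Bool) (d : Bool), 3 ≤ l.length →
    (l.getD 0 d && (l.getD 1 d && l.getD 2 d)) = pvAllN 3 l := by
  intro l d h
  match l, h with
  | a :: b :: c :: rest, _ => simp [pvAllN]

-- the indexed window scan equals pvRun4 (any default: indices stay in range)
theorem pvWindows_eq : ∀ (fl : List Bool) (d : Bool),
    ((List.range (fl.length - 3)).any (fun k =>
      fl.getD k d && (fl.getD (k + 1) d && (fl.getD (k + 2) d && fl.getD (k + 3) d)))) =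
    pvRun4 fl := by
  intro fl d
  induction fl with
  | nil => simp [pvRun4]
  | cons x xs ih =>
    by_cases h3 : 3 ≤ xs.length
    · have hlen : (x :: xs).length - 3 = (xs.length - 3) + 1 := by simp; omega
      rw [hlen, List.range_succ_eq_map]
      simp only [List.any_cons, List.any_map]
      have htail : (List.range (xs.length - 3)).any
          ((fun k => (x :: xs).getD k d && ((x :: xs).getD (k + 1) d &&
            ((x :: xs).getD (k + 2) d && (x :: xs).getD (k + 3) d))) ∘ Nat.succ) =
          pvRun4 xs := by
        rw [← ih]
        apply PySem.List.any_congr_mem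
        intro k _
        simp [Function.comp]
      rw [htail]
      have hfront : ((x :: xs).getD 0 d && ((x :: xs).getD 1 d &&
          ((x :: xs).getD 2 d && (x :: xs).getD 3 d))) = pvAllN 4 (x :: xs) := by
        simp only [List.getD_cons_zero, List.getD_cons_succ, pvAllN_four_cons]
        rw [pvFront3 xs d h3]
      rw [hfront, pvRun4_cons]
    · have hlen : (x :: xs).length - 3 = 0 := by simp; omega
      rw [hlen, pvRun4_short (x :: xs) (by simp at h3 ⊢; omega)]
      simp

-- getD through map with a mapped default
theorem pvGetD_map (f : Int → Bool) : ∀ (l : List Int) (k : Nat) (d : Int),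
    (l.map f).getD k (f d) = f (l.getD k d) := by
  intro l
  induction l with
  | nil => intro k d; simp
  | cons x xs ih =>
    intro k d
    cases k with
    | zero => simp
    | succ k => simp only [List.map_cons, List.getD_cons_succ]; exact ih k d

-- ===== VERDICT (by name: the statement is the Claim_ definition above) =====
theorem fibonacci_quadruplet_spec : Claim_equal_fibonacci_quadruplet := by
  unfold Claim_equal_fibonacci_quadruplet
  intro arr _
  unfold Spec_fibonacci_quadruplet
  simp only [fibonacci_quadruplet, fibonacci_quadruplet_alt]
  set fs := pvFibLoopA 20 0 1 PySem.Set.empty with hfs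
  set fl := arr.map (fun x => PySem.Set.contains fs x) with hfl
  have hc0 : PySem.Set.contains fs 0 = true := by rw [hfs]; decide
  rw [pvSeqLoopA_eq fs arr 0 (by omega)]
  rw [PySem.List.pyRange_one]
  have hcast : (((arr.length : Int) - 3 - 0)).toNat = arr.length - 3 := by omega
  rw [hcast, List.any_map]
  have harr : arr.length = fl.length := by rw [hfl]; simp
  rw [harr]
  have hany : (List.range (fl.length - 3)).any
      ((fun i =>
        pvIsFib (PySem.List.pyGetD arr i 0) &&
        (pvIsFib (PySem.List.pyGetD arr (i + 1) 0) &&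
        (pvIsFib (PySem.List.pyGetD arr (i + 2) 0) &&
         pvIsFib (PySem.List.pyGetD arr (i + 3) 0)))) ∘
        (fun k : Nat => (0 : Int) + (k : Int))) =
      (List.range (fl.length - 3)).any (fun k =>
        fl.getD k true && (fl.getD (k + 1) true && (fl.getD (k + 2) true && fl.getD (k + 3) true))) := by
    apply PySem.List.any_congr_mem
    intro k _
    have e1 : (0 : Int) + (k : Int) = ((k : Nat) : Int) := by ring
    have e2 : (k : Int) + 1 = ((k + 1 : Nat) : Int) := by push_cast; ring
    have e3 : (k : Int) + 2 = ((k + 2 : Nat) : Int) := by push_cast; ring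
    have e4 : (k : Int) + 3 = ((k + 3 : Nat) : Int) := by push_cast; ring
    simp only [Function.comp, e1, e2, e3, e4, PySem.List.pyGetD_natCast]
    simp only [pvIsFib_eq_contains, ← hfs, ← hc0, hfl, pvGetD_map]
  rw [hany, pvWindows_eq fl true]
  rw [show (4 : Nat) - 0 = 4 from rfl, pvRun4_absorb fl]
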